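-- pv_equiv track=rewrite | github.com/dude31479/python_exercises | buy_8_get_1_free.py | getcostOfCoffee
-- ===== SOURCE A (Python) =====
-- def getcostOfCoffee(coffees, price):
--     total = 0
--     for coffee in range(coffees + 1):
--         if coffee % 9 == 0:
--             continue
--         else:
--             total += price
--     return total
-- ===== SOURCE B (Python) =====
-- def getcostOfCoffee(coffees, price):
--     if coffees < 0:
--         return 0
--     return (coffees - coffees // 9) * price
-- ===== Notes on version B (the rewrite author's own statement) =====
-- stated objective: faster
-- what changed: Replaced the O(n) loop over range(coffees+1) that adds price for every non-multiple-of-9 index with the closed form (coffees - coffees//9) * price (0 for negative coffees).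
import Mathlib
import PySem

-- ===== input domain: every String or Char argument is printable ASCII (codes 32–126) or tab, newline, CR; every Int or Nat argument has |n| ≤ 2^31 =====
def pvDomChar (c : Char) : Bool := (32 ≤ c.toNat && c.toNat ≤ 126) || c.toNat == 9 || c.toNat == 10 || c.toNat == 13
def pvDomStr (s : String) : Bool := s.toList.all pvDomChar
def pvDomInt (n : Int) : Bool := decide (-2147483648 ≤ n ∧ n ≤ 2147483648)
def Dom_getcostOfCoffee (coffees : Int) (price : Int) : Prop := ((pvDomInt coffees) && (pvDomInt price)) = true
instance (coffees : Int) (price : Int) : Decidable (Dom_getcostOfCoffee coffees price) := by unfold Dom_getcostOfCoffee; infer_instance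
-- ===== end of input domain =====

-- B replaces A's O(n) accumulation loop by the O(1) closed form (coffees - coffees//9) * price.

-- ===== PORT A =====
def getcostOfCoffee (coffees : Int) (price : Int) : Int :=
  (PySem.List.pyRange 0 (coffees + 1) 1).foldl
    (fun total coffee => if PySem.Int.mod coffee 9 = 0 then total else total + price) 0

-- ===== PORT B =====
def getcostOfCoffee_alt (coffees : Int) (price : Int) : Int :=
  if coffees < 0 then 0
  else (coffees - PySem.Int.floordiv coffees 9) * price

-- ===== PRECONDITION & SPEC =====
def Spec_getcostOfCoffee (coffees : Int) (price : Int) (out : Int) : Prop := out = getcostOfCoffee_alt coffees price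
instance (coffees : Int) (price : Int) (out : Int) : Decidable (Spec_getcostOfCoffee coffees price out) := by unfold Spec_getcostOfCoffee; infer_instance

-- ===== CLAIM (what is proved, stated in full; the proofs are below) =====
def Claim_equal_getcostOfCoffee : Prop := ∀ (coffees : Int) (price : Int), Dom_getcostOfCoffee coffees price → Spec_getcostOfCoffee coffees price (getcostOfCoffee coffees price)

-- ===== LEMMAS AND PROOFS =====

-- A's loop over range n sums price over the k < n with k % 9 ≠ 0, and there are n - ⌈n/9⌉ of them.
theorem pv_fold_range (price : Int) (n : Nat) :
    List.foldl (fun total coffee => if PySem.Int.mod coffee 9 = 0 then total else total + price) 0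
      ((List.range n).map (fun (k : Nat) => (0 : Int) + (k : Int)))
      = ((n : Int) - (((n + 8) / 9 : Nat) : Int)) * price := by
  induction n with
  | zero => simp
  | succ n ih =>
    rw [List.range_succ, List.map_append, List.foldl_append]
    simp only [List.map, List.foldl, ih]
    have hm : PySem.Int.mod (0 + (n : Int)) 9 = ((n % 9 : Nat) : Int) := by
      rw [zero_add]; exact_mod_cast PySem.Int.mod_natCast n 9
    by_cases h : n % 9 = 0
    · have hd : (n + 1 + 8) / 9 = (n + 8) / 9 + 1 := by omega
      rw [hm]
      have hz : ((n % 9 : Nat) : Int) = 0 := by exact_mod_cast h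
      rw [if_pos hz, hd]
      push_cast
      ring
    · have hd : (n + 1 + 8) / 9 = (n + 8) / 9 := by omega
      have hh : ¬ ((n % 9 : Nat) : Int) = 0 := by exact_mod_cast h
      rw [hm, if_neg hh, hd]
      push_cast
      ring

-- ===== VERDICT (by name: the statement is the Claim_ definition above) =====
theorem getcostOfCoffee_spec : Claim_equal_getcostOfCoffee := by
  intro coffees price _
  unfold Spec_getcostOfCoffee getcostOfCoffee getcostOfCoffee_alt
  rw [PySem.List.pyRange_one]
  by_cases hneg : coffees < 0
  · have h0 : (coffees + 1 - 0).toNat = 0 := by omega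
    rw [h0, if_pos hneg]
    simp
  · have hn : coffees = ((coffees.toNat : Int)) := by omega
    set n := coffees.toNat with hdef
    have h1 : (coffees + 1 - 0).toNat = n + 1 := by omega
    rw [h1, pv_fold_range price (n + 1), if_neg hneg]
    have hfd : PySem.Int.floordiv coffees 9 = ((n / 9 : Nat) : Int) := by
      rw [hn]; exact_mod_cast PySem.Int.floordiv_natCast n 9
    have hd : (n + 1 + 8) / 9 = n / 9 + 1 := by omega
    rw [hfd, hd, hn]
    push_cast
    ring
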